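-- pv_equiv track=rewrite | github.com/sunilsoni/interview-notes-python | com/interview/2025/feb/visa/test1/cityLine.py | solution
-- ===== SOURCE A (Python) =====
-- def solution(cityLine):
--     """
--     Computes the area of the largest square that can fit within the cityLine skyline.
--
--     A square of side s can be placed if there is a contiguous segment of skyscrapers
--     of length at least s, and every skyscraper in that segment has height at least s.
--
--     This function uses a stack-based approach to compute, for each building,
--     the maximum contiguous block (width) that has buildings of at least that building's height.
--     Then, the candidate square side is the minimum of the building's height and the width.
--
--     :param cityLine: List[int] - heights of the skyscrapers.
--     :return: int - area of the largest square.
--     """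
--     n = len(cityLine)
--     if n == 0:
--         return 0
--
--     # Arrays to store the index of the nearest smaller building on the left and right
--     left = [-1] * n
--     right = [n] * n
--
--     # Compute nearest smaller to the left for each building
--     stack = []
--     for i in range(n):
--         while stack and cityLine[stack[-1]] >= cityLine[i]:
--             stack.pop()
--         left[i] = stack[-1] if stack else -1
--         stack.append(i)
--
--     # Clear stack for computing nearest smaller to the right
--     stack = []
--     for i in range(n - 1, -1, -1):
--         while stack and cityLine[stack[-1]] >= cityLine[i]:
--             stack.pop()
--         right[i] = stack[-1] if stack else n
--         stack.append(i)
--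
--     # Find the maximum square side length
--     max_side = 0
--     for i in range(n):
--         # Width of contiguous block where every building has height >= cityLine[i]
--         width = right[i] - left[i] - 1
--         # Maximum square side using building i as the limiting height
--         side = min(cityLine[i], width)
--         max_side = max(max_side, side)
--
--     return max_side * max_side  # area = side^2
-- ===== SOURCE B (Python) =====
-- def solution(cityLine):
--     """
--     Largest square area fitting under the skyline.
--
--     For each building i, expand directly left and right while neighbours are
--     at least as tall as cityLine[i]; the run length bounds the square whose
--     limiting height is cityLine[i].
--     """
--     n = len(cityLine)
--     best = 0
--     for i in range(n):
--         h = cityLine[i]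
--         l = i
--         while l > 0 and cityLine[l - 1] >= h:
--             l -= 1
--         r = i
--         while r + 1 < n and cityLine[r + 1] >= h:
--             r += 1
--         side = min(h, r - l + 1)
--         if side > best:
--             best = side
--     return best * best
-- ===== Notes on version B (the rewrite author's own statement) =====
-- stated objective: simpler
-- what changed: Replaces the two monotonic-stack passes (nearest-smaller-left/right arrays) by a direct per-building expansion: for each building scan left and right while neighbours are at least as tall, giving the run length immediately.
import Mathlib
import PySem

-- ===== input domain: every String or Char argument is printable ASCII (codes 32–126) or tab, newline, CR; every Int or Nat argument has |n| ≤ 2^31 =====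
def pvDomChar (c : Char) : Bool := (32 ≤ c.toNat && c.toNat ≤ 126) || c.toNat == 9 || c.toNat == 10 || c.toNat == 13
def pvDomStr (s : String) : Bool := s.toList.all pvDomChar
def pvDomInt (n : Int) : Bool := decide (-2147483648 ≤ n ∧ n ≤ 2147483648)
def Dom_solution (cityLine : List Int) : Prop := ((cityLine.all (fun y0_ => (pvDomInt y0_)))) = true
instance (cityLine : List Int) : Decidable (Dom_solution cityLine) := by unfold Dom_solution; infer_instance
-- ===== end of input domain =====

-- B replaces A's two monotonic-stack passes by a direct per-building left/right expansion (simpler, same return value).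

-- ===== PORT A =====
-- 'while stack and cityLine[stack[-1]] >= cityLine[i]: stack.pop()' — stack head = Python stack[-1].
-- All indices stored in the stack are in range, so getD's default is never read.
def popGE (h : List Int) (x : Int) : List Nat → List Nat
  | [] => []
  | j :: s => if h.getD j 0 ≥ x then popGE h x s else j :: s

-- stack[-1] if stack else d
def topOr (s : List Nat) (d : Int) : Int :=
  match s with
  | [] => d
  | j :: _ => (j : Int)

-- one iteration of the first loop: state = (stack, left); left is built in index order
def leftStep (h : List Int) (st : List Nat × List Int) (i : Nat) : List Nat × List Int :=
  let s := popGE h (h.getD i 0) st.1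
  (i :: s, st.2 ++ [topOr s (-1)])

-- one iteration of the second loop (i runs n-1..0): right[i] is prepended, so the
-- accumulator ends up aligned with the index order
def rightStep (h : List Int) (n : Nat) (st : List Nat × List Int) (i : Nat) : List Nat × List Int :=
  let s := popGE h (h.getD i 0) st.1
  (i :: s, topOr s (n : Int) :: st.2)

-- range(n-1,-1,-1) visits exactly n-1,…,0 = (List.range n).reverse
def solution (cityLine : List Int) : Int :=
  let n := cityLine.length
  if n = 0 then 0
  else
    let left := ((List.range n).foldl (leftStep cityLine) ([], [])).2
    let right := ((List.range n).reverse.foldl (rightStep cityLine n) ([], [])).2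
    let maxSide := (List.range n).foldl
      (fun ms i => max ms (min (cityLine.getD i 0) (right.getD i 0 - left.getD i 0 - 1))) 0
    maxSide * maxSide

-- ===== PORT B =====
-- 'l = i; while l > 0 and cityLine[l-1] >= h: l -= 1'
def expandL (h : List Int) (x : Int) : Nat → Nat
  | 0 => 0
  | l + 1 => if h.getD l 0 ≥ x then expandL h x l else l + 1

-- 'r = i; while r + 1 < n and cityLine[r+1] >= h: r += 1'
def expandR (h : List Int) (x : Int) (n : Nat) (r : Nat) : Nat :=
  if _hr : r + 1 < n then
    if h.getD (r + 1) 0 ≥ x then expandR h x n (r + 1) else r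
  else r
termination_by n - r

def solution_alt (cityLine : List Int) : Int :=
  let n := cityLine.length
  let best := (List.range n).foldl (fun best i =>
    let x := cityLine.getD i 0
    let l := expandL cityLine x i
    let r := expandR cityLine x n i
    let side := min x ((r : Int) - (l : Int) + 1)
    if side > best then side else best) 0
  best * best

-- ===== PRECONDITION & SPEC =====
def Spec_solution (cityLine : List Int) (out : Int) : Prop := out = solution_alt cityLine
instance (cityLine : List Int) (out : Int) : Decidable (Spec_solution cityLine out) := by unfold Spec_solution; infer_instance

-- ===== CLAIM (what is proved, stated in full; the proofs are below) =====
def Claim_equal_solution : Prop := ∀ (cityLine : List Int), Dom_solution cityLine → Spec_solution cityLine (solution cityLine)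

-- ===== LEMMAS AND PROOFS =====

-- value spec of A's left[i]: nearest index to the left with strictly smaller height, else -1
def LSpec (h : List Int) (i : Nat) (v : Int) : Prop :=
  (v = -1 ∧ ∀ m, m < i → h.getD i 0 ≤ h.getD m 0) ∨
  (∃ j : Nat, v = (j : Int) ∧ j < i ∧ h.getD j 0 < h.getD i 0 ∧
    ∀ m, j < m → m < i → h.getD i 0 ≤ h.getD m 0)

-- value spec of A's right[i]: nearest index to the right with strictly smaller height, else n
def RSpec (h : List Int) (n i : Nat) (v : Int) : Prop :=
  (v = (n : Int) ∧ ∀ m, i < m → m < n → h.getD i 0 ≤ h.getD m 0) ∨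
  (∃ j : Nat, v = (j : Int) ∧ i < j ∧ j < n ∧ h.getD j 0 < h.getD i 0 ∧
    ∀ m, i < m → m < j → h.getD i 0 ≤ h.getD m 0)

lemma popGE_sublist (h : List Int) (x : Int) : ∀ s : List Nat, List.Sublist (popGE h x s) s := by
  intro s
  induction s with
  | nil => simp [popGE]
  | cons j t ih =>
    by_cases hx : h.getD j 0 ≥ x
    · simp only [popGE]
      rw [if_pos hx]
      exact ih.trans (List.sublist_cons_self j t)
    · simp only [popGE]
      rw [if_neg hx]

lemma popGE_popped (h : List Int) (x : Int) :
    ∀ s : List Nat, ∀ m ∈ s, m ∉ popGE h x s → x ≤ h.getD m 0 := by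
  intro s
  induction s with
  | nil => simp
  | cons j t ih =>
    intro m hm hnm
    by_cases hx : h.getD j 0 ≥ x
    · rcases List.mem_cons.mp hm with hm | hm
      · exact hm ▸ hx
      · refine ih m hm (fun hmem => hnm ?_)
        simp only [popGE]
        rwa [if_pos hx]
    · simp only [popGE] at hnm
      rw [if_neg hx] at hnm
      exact absurd hm hnm

lemma popGE_char (h : List Int) (x : Int) (i : Nat) :
    ∀ s : List Nat, (∀ j ∈ s, j < i) → s.Pairwise (fun a b => b < a) →
    (∀ m, m < i → m ∉ s → x ≤ h.getD m 0 ∨ ∃ j ∈ s, m < j ∧ h.getD j 0 ≤ h.getD m 0) →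
    (popGE h x s = [] ∧ ∀ m, m < i → x ≤ h.getD m 0) ∨
    (∃ j t, popGE h x s = j :: t ∧ j < i ∧ h.getD j 0 < x ∧
      ∀ m, j < m → m < i → x ≤ h.getD m 0) := by
  intro s
  induction s with
  | nil =>
    intro _ _ hc
    refine Or.inl ⟨rfl, fun m hm => ?_⟩
    rcases hc m hm (by simp) with h1 | ⟨j, hj, _⟩
    · exact h1
    · simp at hj
  | cons j t ih =>
    intro hb hp hc
    by_cases hx : h.getD j 0 ≥ x
    · have hres : popGE h x (j :: t) = popGE h x t := by
        simp only [popGE]; rw [if_pos hx]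
      rw [hres]
      refine ih (fun a ha => hb a (by simp [ha])) ((List.pairwise_cons.mp hp).2) ?_
      intro m hm hmt
      by_cases hmj : m = j
      · exact Or.inl (hmj ▸ hx)
      · rcases hc m hm (by simp [hmj, hmt]) with h1 | ⟨j', hj', hlt, hle⟩
        · exact Or.inl h1
        · rcases List.mem_cons.mp hj' with hj' | hj''
          · exact Or.inl (le_trans hx ((hj' ▸ hle)))
          · exact Or.inr ⟨j', hj'', hlt, hle⟩
    · have hres : popGE h x (j :: t) = j :: t := by
        simp only [popGE]; rw [if_neg hx]
      refine Or.inr ⟨j, t, hres, hb j (by simp), by omega, ?_⟩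
      intro m hjm hmi
      have hmt : m ∉ t := fun hm => absurd ((List.pairwise_cons.mp hp).1 m hm) (by omega)
      have hms : m ∉ j :: t := by
        intro hm
        rcases List.mem_cons.mp hm with hm | hm
        · omega
        · exact hmt hm
      rcases hc m hmi hms with h1 | ⟨j', hj', hlt, _⟩
      · exact h1
      · rcases List.mem_cons.mp hj' with hj' | hj''
        · omega
        · exact absurd ((List.pairwise_cons.mp hp).1 j' hj'') (by omega)

lemma popGE_charR (h : List Int) (x : Int) (lo n : Nat) :
    ∀ s : List Nat, (∀ j ∈ s, lo ≤ j ∧ j < n) → s.Pairwise (fun a b => a < b) →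
    (∀ m, lo ≤ m → m < n → m ∉ s → x ≤ h.getD m 0 ∨ ∃ j ∈ s, j < m ∧ h.getD j 0 ≤ h.getD m 0) →
    (popGE h x s = [] ∧ ∀ m, lo ≤ m → m < n → x ≤ h.getD m 0) ∨
    (∃ j t, popGE h x s = j :: t ∧ lo ≤ j ∧ j < n ∧ h.getD j 0 < x ∧
      ∀ m, lo ≤ m → m < j → x ≤ h.getD m 0) := by
  intro s
  induction s with
  | nil =>
    intro _ _ hc
    refine Or.inl ⟨rfl, fun m hlo hm => ?_⟩
    rcases hc m hlo hm (by simp) with h1 | ⟨j, hj, _⟩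
    · exact h1
    · simp at hj
  | cons j t ih =>
    intro hb hp hc
    by_cases hx : h.getD j 0 ≥ x
    · have hres : popGE h x (j :: t) = popGE h x t := by
        simp only [popGE]; rw [if_pos hx]
      rw [hres]
      refine ih (fun a ha => hb a (by simp [ha])) ((List.pairwise_cons.mp hp).2) ?_
      intro m hlo hm hmt
      by_cases hmj : m = j
      · exact Or.inl (hmj ▸ hx)
      · rcases hc m hlo hm (by simp [hmj, hmt]) with h1 | ⟨j', hj', hlt, hle⟩
        · exact Or.inl h1
        · rcases List.mem_cons.mp hj' with hj' | hj''
          · exact Or.inl (le_trans hx ((hj' ▸ hle)))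
          · exact Or.inr ⟨j', hj'', hlt, hle⟩
    · have hres : popGE h x (j :: t) = j :: t := by
        simp only [popGE]; rw [if_neg hx]
      refine Or.inr ⟨j, t, hres, (hb j (by simp)).1, (hb j (by simp)).2, by omega, ?_⟩
      intro m hlo hmj
      have hjn : j < n := (hb j (by simp)).2
      have hmt : m ∉ t := fun hm => absurd ((List.pairwise_cons.mp hp).1 m hm) (by omega)
      have hms : m ∉ j :: t := by
        intro hm
        rcases List.mem_cons.mp hm with hm | hm
        · omega
        · exact hmt hm
      rcases hc m hlo (by omega) hms with h1 | ⟨j', hj', hlt, _⟩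
      · exact h1
      · rcases List.mem_cons.mp hj' with hj' | hj''
        · omega
        · exact absurd ((List.pairwise_cons.mp hp).1 j' hj'') (by omega)

-- state of A's first loop after processing indices 0..k-1
def LS (h : List Int) (k : Nat) : List Nat × List Int :=
  (List.range k).foldl (leftStep h) ([], [])

lemma LS_succ (h : List Int) (k : Nat) : LS h (k + 1) = leftStep h (LS h k) k := by
  simp [LS, List.range_succ]

lemma leftPass_inv (h : List Int) : ∀ k : Nat,
    (∀ j ∈ (LS h k).1, j < k) ∧
    ((LS h k).1.Pairwise (fun a b => b < a)) ∧
    (∀ m, m < k → m ∉ (LS h k).1 → ∃ j ∈ (LS h k).1, m < j ∧ h.getD j 0 ≤ h.getD m 0) ∧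
    (LS h k).2.length = k ∧
    (∀ i, i < k → LSpec h i ((LS h k).2.getD i 0)) := by
  intro k
  induction k with
  | zero => simp [LS]
  | succ k ih =>
    obtain ⟨hb, hp, hc, hlen, hsp⟩ := ih
    have hstep : LS h (k + 1) = (k :: popGE h (h.getD k 0) (LS h k).1,
        (LS h k).2 ++ [topOr (popGE h (h.getD k 0) (LS h k).1) (-1)]) := by
      rw [LS_succ]; rfl
    rw [hstep]
    generalize hS : (LS h k).1 = s at hb hp hc ⊢
    generalize hA : (LS h k).2 = acc at hlen hsp ⊢
    have hsub : List.Sublist (popGE h (h.getD k 0) s) s := popGE_sublist h (h.getD k 0) s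
    have hchar := popGE_char h (h.getD k 0) k s hb hp
      (fun m hm hms => Or.inr (hc m hm hms))
    have hvL : LSpec h k (topOr (popGE h (h.getD k 0) s) (-1)) := by
      rcases hchar with ⟨he, hall⟩ | ⟨j, t, he, hj, hlt, hall⟩
      · rw [he]
        exact Or.inl ⟨rfl, hall⟩
      · rw [he]
        exact Or.inr ⟨j, rfl, hj, hlt, hall⟩
    refine ⟨?_, ?_, ?_, ?_, ?_⟩
    · intro j hj
      rcases List.mem_cons.mp hj with hj | hj
      · omega
      · exact Nat.lt_succ_of_lt (hb j (hsub.subset hj))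
    · exact List.pairwise_cons.mpr ⟨fun a ha => hb a (hsub.subset ha), hp.sublist hsub⟩
    · intro m hm hms
      have hmk : m ≠ k := by
        intro he; exact hms (by simp [he])
      have hm' : m < k := by omega
      by_cases hmem : m ∈ s
      · have hpop : h.getD k 0 ≤ h.getD m 0 :=
          popGE_popped h (h.getD k 0) s m hmem
            (fun hm2 => hms (List.mem_cons.mpr (Or.inr hm2)))
        exact ⟨k, by simp, hm', hpop⟩
      · obtain ⟨j, hjs, hmj, hle⟩ := hc m hm' hmem
        by_cases hj' : j ∈ popGE h (h.getD k 0) s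
        · exact ⟨j, List.mem_cons.mpr (Or.inr hj'), hmj, hle⟩
        · have : h.getD k 0 ≤ h.getD j 0 := popGE_popped h (h.getD k 0) s j hjs hj'
          exact ⟨k, by simp, hm', le_trans this hle⟩
    · simp [hlen]
    · intro i hi
      by_cases hik : i < k
      · have heq : (acc ++ [topOr (popGE h (h.getD k 0) s) (-1)]).getD i 0 = acc.getD i 0 := by
          simp [List.getD, List.getElem?_append_left (hlen ▸ hik)]
        rw [heq]
        exact hsp i hik
      · have hik' : i = k := by omega
        subst hik'
        have heq : ∀ v : Int, (acc ++ [v]).getD i 0 = v := by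
          intro v
          rw [List.getD, ← hlen, List.getElem?_concat_length]
          rfl
        rw [heq]
        exact hvL

-- state of A's second loop after processing indices n-1, …, n-k
def RS (h : List Int) (n k : Nat) : List Nat × List Int :=
  (((List.range n).reverse).take k).foldl (rightStep h n) ([], [])

lemma revRange_take_succ (n k : Nat) (hk : k < n) :
    ((List.range n).reverse).take (k + 1) = ((List.range n).reverse).take k ++ [n - 1 - k] := by
  have hget : ((List.range n).reverse)[k]? = some (n - 1 - k) := by
    rw [List.getElem?_eq_getElem (by simpa using hk)]
    simp [List.getElem_reverse]
  rw [List.take_add_one, hget]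
  simp

lemma RS_succ (h : List Int) (n k : Nat) (hk : k < n) :
    RS h n (k + 1) = rightStep h n (RS h n k) (n - 1 - k) := by
  simp [RS, revRange_take_succ n k hk]

lemma rightPass_inv (h : List Int) (n : Nat) : ∀ k : Nat, k ≤ n →
    (∀ j ∈ (RS h n k).1, n - k ≤ j ∧ j < n) ∧
    ((RS h n k).1.Pairwise (fun a b => a < b)) ∧
    (∀ m, n - k ≤ m → m < n → m ∉ (RS h n k).1 →
      ∃ j ∈ (RS h n k).1, j < m ∧ h.getD j 0 ≤ h.getD m 0) ∧
    (RS h n k).2.length = k ∧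
    (∀ p, p < k → RSpec h n (n - k + p) ((RS h n k).2.getD p 0)) := by
  intro k
  induction k with
  | zero => simp [RS]
  | succ k ih =>
    intro hk1
    obtain ⟨hb, hp, hc, hlen, hsp⟩ := ih (by omega)
    have hstep : RS h n (k + 1) = ((n - 1 - k) :: popGE h (h.getD (n - 1 - k) 0) (RS h n k).1,
        topOr (popGE h (h.getD (n - 1 - k) 0) (RS h n k).1) ((n : Nat) : Int) :: (RS h n k).2) := by
      rw [RS_succ h n k (by omega)]; rfl
    rw [hstep]
    generalize hS : (RS h n k).1 = s at hb hp hc ⊢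
    generalize hA : (RS h n k).2 = acc at hlen hsp ⊢
    have hsub : List.Sublist (popGE h (h.getD (n - 1 - k) 0) s) s :=
      popGE_sublist h (h.getD (n - 1 - k) 0) s
    have hchar := popGE_charR h (h.getD (n - 1 - k) 0) (n - 1 - k + 1) n s
      (fun j hj => ⟨by have := (hb j hj).1; omega, (hb j hj).2⟩) hp
      (fun m hlo hm hms => Or.inr (hc m (by omega) hm hms))
    have hvR : RSpec h n (n - 1 - k) (topOr (popGE h (h.getD (n - 1 - k) 0) s) ((n : Nat) : Int)) := by
      rcases hchar with ⟨he, hall⟩ | ⟨j, t, he, hj, hjn, hlt, hall⟩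
      · rw [he]
        exact Or.inl ⟨rfl, fun m h1 h2 => hall m (by omega) h2⟩
      · rw [he]
        exact Or.inr ⟨j, rfl, by omega, hjn, hlt, fun m h1 h2 => hall m (by omega) h2⟩
    refine ⟨?_, ?_, ?_, ?_, ?_⟩
    · intro j hj
      rcases List.mem_cons.mp hj with hj | hj
      · omega
      · have := hb j (hsub.subset hj); omega
    · exact List.pairwise_cons.mpr
        ⟨fun a ha => by have := (hb a (hsub.subset ha)).1; omega, hp.sublist hsub⟩
    · intro m hm1 hm2 hms
      have hmi : m ≠ n - 1 - k := by
        intro he; exact hms (by simp [he])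
      have hm' : n - k ≤ m := by omega
      by_cases hmem : m ∈ s
      · have hpop : h.getD (n - 1 - k) 0 ≤ h.getD m 0 :=
          popGE_popped h (h.getD (n - 1 - k) 0) s m hmem
            (fun hm2 => hms (List.mem_cons.mpr (Or.inr hm2)))
        have him : n - 1 - k < m := by have := (hb m hmem).1; omega
        exact ⟨n - 1 - k, by simp, him, hpop⟩
      · obtain ⟨j, hjs, hmj, hle⟩ := hc m hm' hm2 hmem
        by_cases hj' : j ∈ popGE h (h.getD (n - 1 - k) 0) s
        · exact ⟨j, List.mem_cons.mpr (Or.inr hj'), hmj, hle⟩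
        · have hxj : h.getD (n - 1 - k) 0 ≤ h.getD j 0 :=
            popGE_popped h (h.getD (n - 1 - k) 0) s j hjs hj'
          have him : n - 1 - k < m := by have := (hb j hjs).1; omega
          exact ⟨n - 1 - k, by simp, him, le_trans hxj hle⟩
    · simp [hlen]
    · intro p hp'
      match p with
      | 0 =>
        have hidx : n - (k + 1) + 0 = n - 1 - k := by omega
        rw [hidx]
        simpa using hvR
      | p + 1 =>
        have hidx : n - (k + 1) + (p + 1) = n - k + p := by omega
        rw [hidx]
        simpa using hsp p (by omega)

-- B's left expansion: characterisation of the while loop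
lemma expandL_le (h : List Int) (x : Int) : ∀ i, expandL h x i ≤ i := by
  intro i
  induction i with
  | zero => simp [expandL]
  | succ l ih =>
    by_cases hx : h.getD l 0 ≥ x
    · rw [expandL, if_pos hx]; omega
    · rw [expandL, if_neg hx]

lemma expandL_run (h : List Int) (x : Int) :
    ∀ i k, expandL h x i ≤ k → k < i → x ≤ h.getD k 0 := by
  intro i
  induction i with
  | zero => omega
  | succ l ih =>
    intro k h1 h2
    by_cases hx : h.getD l 0 ≥ x
    · rw [expandL, if_pos hx] at h1
      by_cases hkl : k = l
      · exact hkl ▸ hx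
      · exact ih k h1 (by omega)
    · rw [expandL, if_neg hx] at h1
      omega

lemma expandL_stop (h : List Int) (x : Int) :
    ∀ i, expandL h x i = 0 ∨ (0 < expandL h x i ∧ h.getD (expandL h x i - 1) 0 < x) := by
  intro i
  induction i with
  | zero => simp [expandL]
  | succ l ih =>
    by_cases hx : h.getD l 0 ≥ x
    · rw [expandL, if_pos hx]; exact ih
    · rw [expandL, if_neg hx]
      exact Or.inr ⟨by omega, by simpa using not_le.mp hx⟩

-- B's right expansion: characterisation of the while loop
lemma expandR_spec (h : List Int) (x : Int) (n : Nat) : ∀ r,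
    r ≤ expandR h x n r ∧ (r < n → expandR h x n r < n) ∧
    (∀ k, r < k → k ≤ expandR h x n r → x ≤ h.getD k 0) ∧
    (n ≤ expandR h x n r + 1 ∨
      (expandR h x n r + 1 < n ∧ h.getD (expandR h x n r + 1) 0 < x)) := by
  intro r
  fun_induction expandR h x n r with
  | case1 r hr hx ih =>
    obtain ⟨i1, i2, i3, i4⟩ := ih
    refine ⟨by omega, fun _ => i2 (by omega), ?_, i4⟩
    intro k hk1 hk2
    by_cases hkr : k = r + 1
    · exact hkr ▸ hx
    · exact i3 k (by omega) hk2
  | case2 r hr hx =>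
    exact ⟨le_refl r, fun h => h, by omega, Or.inr ⟨hr, by simpa using not_le.mp hx⟩⟩
  | case3 r hr =>
    exact ⟨le_refl r, by omega, by omega, Or.inl (by omega)⟩

-- uniqueness: any value satisfying LSpec equals B's left bound minus one
lemma LSpec_eq (h : List Int) (i : Nat) (v : Int) (hv : LSpec h i v) :
    v = (expandL h (h.getD i 0) i : Int) - 1 := by
  have hle := expandL_le h (h.getD i 0) i
  have hrun : ∀ k, expandL h (h.getD i 0) i ≤ k → k < i → h.getD i 0 ≤ h.getD k 0 :=
    fun k => expandL_run h (h.getD i 0) i k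
  have hstop := expandL_stop h (h.getD i 0) i
  generalize hl : expandL h (h.getD i 0) i = l at hle hrun hstop ⊢
  rcases hv with ⟨hv, hall⟩ | ⟨j, hv, hj, hlt, hall⟩
  · have hl0 : l = 0 := by
      rcases hstop with h0 | ⟨hpos, hlt'⟩
      · exact h0
      · exact absurd (hall (l - 1) (by omega)) (by omega)
    rw [hv, hl0]
    simp
  · have hlj : l = j + 1 := by
      have h1 : l ≤ j + 1 := by
        by_contra hgt
        rcases hstop with h0 | ⟨hpos, hlt'⟩
        · omega
        · exact absurd (hall (l - 1) (by omega) (by omega)) (by omega)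
      have h2 : j + 1 ≤ l := by
        by_contra hlt'
        exact absurd (hrun j (by omega) hj) (by omega)
      omega
    rw [hv, hlj]
    push_cast
    ring

-- uniqueness: any value satisfying RSpec equals B's right bound plus one
lemma RSpec_eq (h : List Int) (n i : Nat) (hi : i < n) (v : Int) (hv : RSpec h n i v) :
    v = (expandR h (h.getD i 0) n i : Int) + 1 := by
  obtain ⟨hle, hlt, hrun, hstop⟩ := expandR_spec h (h.getD i 0) n i
  have hrn : expandR h (h.getD i 0) n i < n := hlt hi
  generalize hr : expandR h (h.getD i 0) n i = r at hle hrn hrun hstop ⊢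
  rcases hv with ⟨hv, hall⟩ | ⟨j, hv, hij, hjn, hjlt, hall⟩
  · have hrn1 : r = n - 1 := by
      rcases hstop with h1 | ⟨h1, h2⟩
      · omega
      · exact absurd (hall (r + 1) (by omega) (by omega)) (by omega)
    rw [hv, hrn1]
    omega
  · have hrj : r = j - 1 := by
      have h1 : j - 1 ≤ r := by
        by_contra hlt'
        rcases hstop with h2 | ⟨h2, h3⟩
        · omega
        · exact absurd (hall (r + 1) (by omega) (by omega)) (by omega)
      have h2 : r ≤ j - 1 := by
        by_contra hgt
        exact absurd (hrun j (by omega) (by omega)) (by omega)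
      omega
    rw [hv, hrj]
    omega

-- ===== VERDICT (by name: the statement is the Claim_ definition above) =====
theorem solution_spec : Claim_equal_solution := by
  intro cityLine _
  unfold Spec_solution
  by_cases hn : cityLine.length = 0
  · have : cityLine = [] := List.length_eq_zero_iff.mp hn
    subst this
    rfl
  · set h := cityLine with hcl
    set n := h.length with hlen
    obtain ⟨_, _, _, hLlen, hLsp⟩ := leftPass_inv h n
    obtain ⟨_, _, _, hRlen, hRsp⟩ := rightPass_inv h n n (le_refl n)
    have htake : ((List.range n).reverse).take n = (List.range n).reverse := by
      apply List.take_of_length_le; simp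
    have hfold :
        (List.range n).foldl
          (fun ms i => max ms (min (h.getD i 0)
            ((((List.range n).reverse.foldl (rightStep h n) ([], [])).2).getD i 0 -
             (((List.range n).foldl (leftStep h) ([], [])).2).getD i 0 - 1))) 0 =
        (List.range n).foldl (fun best i =>
          let x := h.getD i 0
          let l := expandL h x i
          let r := expandR h x n i
          let side := min x ((r : Int) - (l : Int) + 1)
          if side > best then side else best) 0 := by
      apply PySem.List.foldl_congr_mem
      intro acc i hi
      have hi' : i < n := List.mem_range.mp hi
      have hLv := hLsp i hi'
      have hRv : RSpec h n i ((((List.range n).reverse.foldl (rightStep h n) ([], [])).2).getD i 0) := by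
        have := hRsp i hi'
        rw [Nat.sub_self] at this
        simpa [RS, htake] using this
      have hLv' : LSpec h i (((List.range n).foldl (leftStep h) ([], [])).2.getD i 0) := by
        simpa only [LS] using hLv
      have hL := LSpec_eq h i _ hLv'
      have hR := RSpec_eq h n i hi' _ hRv
      dsimp only
      rw [hL, hR]
      split_ifs <;> omega
    simp only [solution, solution_alt, ← hlen, if_neg hn]
    rw [hfold]

-- (end)
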